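-- pv_equiv track=rewrite | github.com/nascarsayan/lintcode | 048.py | majorityNumber
-- ===== SOURCE A (Python) =====
-- def majorityNumber(nums, k):
--   # write your code here
--   l = len(nums)
--   if l == 0:
--     return None
--   if l < k:
--     return nums[0]
--   nums.sort()
--   ele = None
--   cnt = 0
--   for num in nums:
--     if num != ele:
--       ele = num
--       cnt = 1
--     else:
--       cnt += 1
--       if cnt > l // k:
--         return num
--   return None
-- ===== SOURCE B (Python) =====
-- def majorityNumber(nums, k):
--     l = len(nums)
--     if l == 0:
--         return None
--     if l < k:
--         return nums[0]
--     t = l // k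
--     counts = {}
--     for x in nums:
--         counts[x] = counts.get(x, 0) + 1
--     best = None
--     for v, c in counts.items():
--         if c > t and (best is None or v < best):
--             best = v
--     return best
-- ===== Notes on version B (the rewrite author's own statement) =====
-- stated objective: alternative
-- what changed: Replaces A's in-place sort followed by a run-length scan with a single counting pass into a dict plus a scan of the dict for the smallest value whose count exceeds len(nums)//k (no sorting, nums left unmutated; return-value equivalence only, A sorts nums in place).
-- outside the precondition, e.g. on majorityNumber([1, 2, 3], -1): A returns None, B returns 1; on majorityNumber([1, 1], 0): A raises ZeroDivisionError, B raises ZeroDivisionError; on majorityNumber([1], 0): A returns None, B raises ZeroDivisionError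
import Mathlib
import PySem

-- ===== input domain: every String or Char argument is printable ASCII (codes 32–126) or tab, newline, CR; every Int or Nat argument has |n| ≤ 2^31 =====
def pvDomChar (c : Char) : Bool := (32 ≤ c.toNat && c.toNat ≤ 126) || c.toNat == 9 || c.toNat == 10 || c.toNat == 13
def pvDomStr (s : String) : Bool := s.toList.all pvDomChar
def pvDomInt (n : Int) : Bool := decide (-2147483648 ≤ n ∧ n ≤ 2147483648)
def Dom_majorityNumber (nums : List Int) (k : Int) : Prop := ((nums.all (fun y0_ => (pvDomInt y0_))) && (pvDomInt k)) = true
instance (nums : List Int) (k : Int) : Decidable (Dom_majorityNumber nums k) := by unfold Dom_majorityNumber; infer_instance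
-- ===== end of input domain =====

-- B replaces A's sort + run-length scan by one counting pass into a dict plus a min-scan of that
-- dict (an alternative algorithm, no sort). A sorts nums in place (a caller-visible mutation)
-- while B leaves nums untouched: the equivalence proved here is about the RETURN value only.

-- ===== PORT A =====
-- the for-loop of A over the sorted list, with early return; state = (ele, cnt)
def loopA (l k : Int) : List Int → Option Int → Int → Option Int
  | [], _, _ => none
  | num :: rest, ele, cnt =>
    if some num ≠ ele then loopA l k rest (some num) 1
    else if cnt + 1 > PySem.Int.floordiv l k then some num
    else loopA l k rest ele (cnt + 1)

def majorityNumber (nums : List Int) (k : Int) : Option Int :=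
  let l : Int := nums.length
  if l = 0 then none
  else if l < k then PySem.List.pyGet? nums 0
  else loopA l k (PySem.List.sorted nums (fun x => x) false) none 0

-- ===== PORT B =====
def majorityNumber_alt (nums : List Int) (k : Int) : Option Int :=
  let l : Int := nums.length
  if l = 0 then none
  else if l < k then PySem.List.pyGet? nums 0
  else
    let t := PySem.Int.floordiv l k
    let counts := nums.foldl (fun d x => d.insert x (d.getD x 0 + 1)) (PySem.Dict.empty : PySem.Dict Int Int)
    counts.items.foldl
      (fun best p =>
        if p.2 > t && (match best with | none => true | some b => decide (p.1 < b)) then some p.1 else best)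
      none

-- ===== PRECONDITION & SPEC =====
-- Pre_ excludes k = 0 with nonempty nums, where A raises ZeroDivisionError, and restricts to the
-- natural domain k ≥ 1: for k < 0 the threshold len(nums)//k is negative and 'occurring more than
-- len(nums)//k times' is meaningless, so A's value there (the smallest value occurring at least
-- twice, else None) is an artifact of its check placement that B does not reproduce.
def Pre_majorityNumber (nums : List Int) (k : Int) : Prop := nums = [] ∨ 1 ≤ k
instance (nums : List Int) (k : Int) : Decidable (Pre_majorityNumber nums k) := by unfold Pre_majorityNumber; infer_instance
def pvWitness_majorityNumber : List Int × Int := ([1, 1, 1, 2], 2)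

def Spec_majorityNumber (nums : List Int) (k : Int) (out : Option Int) : Prop := out = majorityNumber_alt nums k
instance (nums : List Int) (k : Int) (out : Option Int) : Decidable (Spec_majorityNumber nums k out) := by unfold Spec_majorityNumber; infer_instance

-- ===== CLAIM (what is proved, stated in full; the proofs are below) =====
def Claim_equal_majorityNumber : Prop := ∀ (nums : List Int) (k : Int), Dom_majorityNumber nums k → Pre_majorityNumber nums k → Spec_majorityNumber nums k (majorityNumber nums k)

-- ===== LEMMAS AND PROOFS =====

-- the first element (in zs's order) of zs whose multiplicity in zs exceeds t
def qualHead (zs : List Int) (t : Int) : Option Int :=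
  (zs.filter (fun v => decide (t < (zs.count v : Int)))).head?

-- the step A takes on a run boundary: a fresh run of y with count 1 on the rest of the list
theorem qualHead_step (t : Int) (y : Int) (ys : List Int) :
    (if t < 1 + (ys.count y : Int) then some y else qualHead (ys.filter (fun v => decide (v ≠ y))) t)
      = qualHead (y :: ys) t := by
  unfold qualHead
  by_cases h : t < 1 + (ys.count y : Int)
  · rw [if_pos h, List.filter_cons_of_pos (by simp [List.count_cons_self]; omega)]
    rfl
  · rw [if_neg h, List.filter_cons_of_neg (by simp [List.count_cons_self]; omega)]
    congr 1
    rw [List.filter_filter]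
    apply List.filter_congr
    intro v hv
    by_cases hvy : v = y
    · subst hvy
      rw [List.count_cons_self]
      simp only [ne_eq, not_true_eq_false, decide_false, Bool.and_false]
      symm
      rw [decide_eq_false_iff_not]
      push_cast
      omega
    · have hcnt : (y :: ys).count v = ys.count v := List.count_cons_of_ne (Ne.symm hvy)
      have hcnt2 : (ys.filter (fun v => decide (v ≠ y))).count v = ys.count v :=
        List.count_filter (by simp [hvy])
      rw [hcnt, hcnt2]
      simp [hvy]

-- A's loop from state (some a, c), on a sorted tail whose elements all dominate a
theorem loopA_run (l k t : Int) (ht : t = PySem.Int.floordiv l k) (ht1 : 1 ≤ t) :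
    ∀ (ys : List Int) (a c : Int), ys.Pairwise (· ≤ ·) → (∀ y ∈ ys, a ≤ y) →
      0 ≤ c → c ≤ t →
      loopA l k ys (some a) c =
        (if t < c + (ys.count a : Int) then some a
         else qualHead (ys.filter (fun v => decide (v ≠ a))) t) := by
  intro ys
  induction ys with
  | nil =>
    intro a c _ _ _ hct
    rw [if_neg (by simp; omega)]
    rfl
  | cons y ys' ih =>
    intro a c hp hmin hc0 hct
    have hp' : ys'.Pairwise (· ≤ ·) := hp.of_cons
    by_cases hy : y = a
    · subst hy
      rw [loopA, if_neg (by simp), ← ht]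
      by_cases hc : t < c + 1
      · rw [if_pos (by omega), if_pos (by rw [List.count_cons_self]; push_cast; omega)]
      · rw [if_neg (by omega)]
        rw [ih y (c + 1) hp' (fun z hz => List.rel_of_pairwise_cons hp hz) (by omega) (by omega)]
        rw [List.count_cons_self, List.filter_cons_of_neg (by simp)]
        apply if_congr _ rfl rfl
        push_cast
        omega
    · have hay : a < y := lt_of_le_of_ne (hmin y (List.mem_cons_self)) (fun e => hy e.symm)
      have hnot : ∀ z ∈ y :: ys', z ≠ a := by
        intro z hz
        rcases List.mem_cons.mp hz with rfl | hz'
        · omega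
        · have := List.rel_of_pairwise_cons hp hz'
          omega
      have hcnt : (y :: ys').count a = 0 :=
        List.count_eq_zero.mpr (fun hmem => hnot a hmem rfl)
      rw [loopA, if_pos (by simp [hy])]
      conv_rhs => rw [if_neg (by rw [hcnt]; push_cast; omega),
        List.filter_cons_of_pos (by simp [hy]),
        List.filter_eq_self.mpr (fun z hz => by simp [hnot z (List.mem_cons_of_mem _ hz)])]
      rw [ih y 1 hp' (fun z hz => List.rel_of_pairwise_cons hp hz) (by omega) (by omega)]
      exact qualHead_step t y ys'

-- A's loop from the initial state computes qualHead of the sorted list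
theorem loopA_eq_qualHead (l k t : Int) (ht : t = PySem.Int.floordiv l k) (ht1 : 1 ≤ t)
    (ys : List Int) (hp : ys.Pairwise (· ≤ ·)) :
    loopA l k ys none 0 = qualHead ys t := by
  cases ys with
  | nil => rfl
  | cons y ys' =>
    rw [loopA, if_pos (by simp)]
    rw [loopA_run l k t ht ht1 ys' y 1 hp.of_cons (fun z hz => List.rel_of_pairwise_cons hp hz) (by omega) (by omega)]
    exact qualHead_step t y ys'

-- B's min-tracking fold, continued from a some-state, takes the running minimum
theorem foldB_some (q : Int → Bool) :
    ∀ (ds : List Int) (b : Int),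
      ds.foldl (fun best v => if q v && (match best with | none => true | some b' => decide (v < b')) then some v else best) (some b)
        = some ((ds.filter q).foldl min b) := by
  intro ds
  induction ds with
  | nil => intro b; simp
  | cons v ds' ih =>
    intro b
    rw [List.foldl_cons]
    by_cases hq : q v = true
    · by_cases hvb : v < b
      · have h1 : (if q v && (match (some b : Option Int) with | none => true | some b' => decide (v < b')) then some v else some b) = some v := by
          simp [hq, hvb]
        rw [h1, ih, List.filter_cons_of_pos hq, List.foldl_cons, min_eq_right (le_of_lt hvb)]
      · have h1 : (if q v && (match (some b : Option Int) with | none => true | some b' => decide (v < b')) then some v else some b) = some b := by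
          simp [hq, hvb]
        rw [h1, ih, List.filter_cons_of_pos hq, List.foldl_cons, min_eq_left (le_of_not_gt hvb)]
    · have h1 : (if q v && (match (some b : Option Int) with | none => true | some b' => decide (v < b')) then some v else some b) = some b := by
        simp [hq]
      rw [h1, ih, List.filter_cons_of_neg (by simpa using hq)]

-- B's min-tracking fold computes min? of the q-filtered list
theorem foldB_none (q : Int → Bool) :
    ∀ (ds : List Int),
      ds.foldl (fun best v => if q v && (match best with | none => true | some b' => decide (v < b')) then some v else best) none
        = PySem.List.min? (ds.filter q) (fun x => x) := by
  intro ds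
  induction ds with
  | nil => rw [List.filter_nil]; exact ((PySem.List.min?_eq_none_iff [] _).mpr rfl).symm
  | cons v ds' ih =>
    rw [List.foldl_cons]
    by_cases hq : q v = true
    · have h1 : (if q v && (match (none : Option Int) with | none => true | some b' => decide (v < b')) then some v else none) = some v := by
        simp [hq]
      rw [h1, foldB_some q, List.filter_cons_of_pos hq, PySem.List.min?_id_cons]
    · have h1 : (if q v && (match (none : Option Int) with | none => true | some b' => decide (v < b')) then some v else none) = none := by
        simp [hq]
      rw [h1, ih, List.filter_cons_of_neg (by simpa using hq)]

-- the bridge: head of the qualifying sorted values = min of the qualifying distinct values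
theorem qualHead_eq_min (nums : List Int) (t : Int) :
    qualHead (PySem.List.sorted nums (fun x => x) false) t
      = PySem.List.min? ((PySem.Set.ofList nums).filter (fun v => decide (t < (nums.count v : Int)))) (fun x => x) := by
  have hperm := PySem.List.sorted_perm nums (fun x => x) false
  have hcnt : ∀ v : Int, (PySem.List.sorted nums (fun x => x) false).count v = nums.count v :=
    fun v => hperm.count_eq v
  unfold qualHead
  rw [List.filter_congr (fun v _ => by rw [hcnt v])]
  rcases hS : (PySem.List.sorted nums (fun x => x) false).filter (fun v => decide (t < (nums.count v : Int))) with _ | ⟨m, rest⟩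
  · have hnone : ∀ v ∈ nums, ¬ (t < (nums.count v : Int)) := by
      intro v hv hq
      have : v ∈ (PySem.List.sorted nums (fun x => x) false).filter (fun v => decide (t < (nums.count v : Int))) := by
        rw [List.mem_filter]
        exact ⟨(PySem.List.mem_sorted nums (fun x => x) false v).mpr hv, by simpa using hq⟩
      rw [hS] at this
      exact absurd this (List.not_mem_nil)
    have : (PySem.Set.ofList nums).filter (fun v => decide (t < (nums.count v : Int))) = [] := by
      rw [List.filter_eq_nil_iff]
      intro v hv
      simpa using hnone v ((PySem.Set.mem_ofList nums v).mp hv)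
    rw [this]
    exact ((PySem.List.min?_eq_none_iff [] _).mpr rfl).symm
  · have hm : m ∈ nums ∧ t < (nums.count m : Int) := by
      have : m ∈ (PySem.List.sorted nums (fun x => x) false).filter (fun v => decide (t < (nums.count v : Int))) := by
        rw [hS]; exact List.mem_cons_self
      rw [List.mem_filter] at this
      exact ⟨(PySem.List.mem_sorted nums (fun x => x) false m).mp this.1, by simpa using this.2⟩
    have hmle : ∀ v ∈ nums, t < (nums.count v : Int) → m ≤ v := by
      intro v hv hq
      have hvmem : v ∈ (PySem.List.sorted nums (fun x => x) false).filter (fun v => decide (t < (nums.count v : Int))) := by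
        rw [List.mem_filter]
        exact ⟨(PySem.List.mem_sorted nums (fun x => x) false v).mpr hv, by simpa using hq⟩
      rw [hS] at hvmem
      rcases List.mem_cons.mp hvmem with rfl | hvrest
      · exact le_refl v
      · have hpair : ((PySem.List.sorted nums (fun x => x) false).filter (fun v => decide (t < (nums.count v : Int)))).Pairwise (· ≤ ·) :=
          (PySem.List.sorted_pairwise nums (fun x => x)).filter _
        rw [hS] at hpair
        exact List.rel_of_pairwise_cons hpair hvrest
    have hmmem : m ∈ (PySem.Set.ofList nums).filter (fun v => decide (t < (nums.count v : Int))) := by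
      rw [List.mem_filter]
      exact ⟨(PySem.Set.mem_ofList nums m).mpr hm.1, by simpa using hm.2⟩
    rcases hR : PySem.List.min? ((PySem.Set.ofList nums).filter (fun v => decide (t < (nums.count v : Int)))) (fun x => x) with _ | M
    · rw [PySem.List.min?_eq_none_iff] at hR
      rw [hR] at hmmem
      exact absurd hmmem (List.not_mem_nil)
    · have hMmem := PySem.List.min?_mem hR
      rw [List.mem_filter] at hMmem
      have hMnums := (PySem.Set.mem_ofList nums M).mp hMmem.1
      have h1 : m ≤ M := hmle M hMnums (by simpa using hMmem.2)
      have h2 : M ≤ m := PySem.List.min?_isMin hR m hmmem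
      rw [le_antisymm h1 h2]
      rfl

-- ===== VERDICT (by name: the statement is the Claim_ definition above) =====
theorem majorityNumber_spec : Claim_equal_majorityNumber := by
  intro nums k _hdom hpre
  unfold Spec_majorityNumber
  rcases hpre with rfl | hk1
  · simp [majorityNumber, majorityNumber_alt]
  by_cases h0 : (nums.length : Int) = 0
  · simp [majorityNumber, majorityNumber_alt, h0]
  by_cases hlt : (nums.length : Int) < k
  · simp [majorityNumber, majorityNumber_alt, hlt]
  have ht1 : 1 ≤ PySem.Int.floordiv (nums.length : Int) k :=
    (PySem.Int.le_floordiv_iff_mul_le (by omega)).mpr (by omega)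
  have hA : majorityNumber nums k
      = qualHead (PySem.List.sorted nums (fun x => x) false) (PySem.Int.floordiv (nums.length : Int) k) := by
    unfold majorityNumber
    simp only [if_neg h0, if_neg hlt]
    exact loopA_eq_qualHead _ _ _ rfl ht1 _ (PySem.List.sorted_pairwise nums (fun x => x))
  have hB : majorityNumber_alt nums k
      = PySem.List.min? ((PySem.Set.ofList nums).filter
          (fun v => decide ((PySem.Int.floordiv (nums.length : Int) k) < (nums.count v : Int)))) (fun x => x) := by
    unfold majorityNumber_alt
    simp only [if_neg h0, if_neg hlt]
    rw [PySem.Dict.foldl_insert_getD_add_one_eq_counter, PySem.Dict.items_counter, List.foldl_map]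
    exact foldB_none _ _
  rw [hA, hB]
  exact qualHead_eq_min nums _
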